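-- pv_equiv track=rewrite | github.com/d9nchik/laba2ds | main.py | pow_in_n_matrix
-- ===== SOURCE A (Python) =====
-- import copy
--
-- def pow_matrix(matrix1, matrix2):
--     temp = copy.deepcopy(matrix2)
--     for i in range(len(matrix1)):
--         for j in range(len(matrix1)):
--             sum_of_matrix = 0
--             for z in range(len(matrix1)):
--                 sum_of_matrix += matrix1[i][z] * matrix2[z][j]
--             temp[i][j] = sum_of_matrix
--     return temp
--
-- def pow_in_n_matrix(matrixes):
--     k = len(matrixes)
--     temp = copy.deepcopy(matrixes)
--     for z in range(k):
--         temp = pow_matrix(temp, matrixes)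
--
--     for i in range(k):
--         for j in range(k):
--             if (temp[i][j] > 0):
--                 temp[i][j] = 1
--     return temp
-- ===== SOURCE B (Python) =====
-- def _mul(k, a, b):
--     return [[sum(a[i][z] * b[z][j] for z in range(k)) for j in range(k)]
--             for i in range(k)]
--
-- def pow_in_n_matrix(matrixes):
--     # M^(k+1) on the k x k matrix by binary exponentiation, then binarize positives.
--     k = len(matrixes)
--     result = matrixes          # invariant: answer = result * base^exp
--     base = matrixes
--     exp = k
--     while exp > 0:
--         if exp & 1:
--             result = _mul(k, result, base)
--         base = _mul(k, base, base)
--         exp >>= 1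
--     return [[1 if x > 0 else x for x in row] for row in result]
-- ===== Notes on version B (the rewrite author's own statement) =====
-- stated objective: faster
-- what changed: Replaces the k+1 successive O(k^3) matrix multiplications (O(k^4) total) by binary exponentiation computing M^(k+1) with O(log k) multiplications, building fresh rows instead of mutating a deep copy in place.
-- intended difference: On inputs where some row is longer than the number of rows k, A returns those extra columns unchanged past the k x k block (an artefact of mutating a deep copy of the input in place), while B returns the intended pure k x k binarized power matrix. — e.g. on pow_in_n_matrix([[1, 2, 3], [0, -1, 4]]): A returns [[1, 1, 3], [0, -1, 4]], B returns [[1, 1], [0, -1]]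
import Mathlib
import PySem

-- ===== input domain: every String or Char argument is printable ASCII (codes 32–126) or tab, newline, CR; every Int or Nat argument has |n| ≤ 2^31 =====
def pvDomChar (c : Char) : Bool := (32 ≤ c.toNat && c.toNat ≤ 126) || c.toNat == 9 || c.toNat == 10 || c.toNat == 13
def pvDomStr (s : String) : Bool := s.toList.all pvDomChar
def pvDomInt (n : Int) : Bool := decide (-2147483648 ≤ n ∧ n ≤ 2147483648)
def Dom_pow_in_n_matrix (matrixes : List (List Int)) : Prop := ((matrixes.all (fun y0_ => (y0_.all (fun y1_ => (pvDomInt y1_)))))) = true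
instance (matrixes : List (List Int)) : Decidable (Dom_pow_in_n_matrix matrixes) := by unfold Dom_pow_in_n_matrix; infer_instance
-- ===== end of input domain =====

-- B replaces A's k+1 successive matrix multiplications (O(k^4)) by binary
-- exponentiation computing M^(k+1) (O(k^3 log k)) and builds fresh binarized
-- rows; on non-square input (a row longer than k) the two differ as stated in D_.
-- (A mutates only its internal deep copy, never the argument.)

-- ===== PORT A =====
-- Python indexing m[i][j] with in-range non-negative indices, rendered as getD;
-- exact wherever Python does not raise (Pre_ excludes the IndexError inputs).
def pvGet (m : List (List Int)) (i j : Nat) : Int := (m.getD i []).getD j 0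

-- in-place assignment temp[i][j] = v (List.set is a no-op out of range;
-- Pre_ keeps all written cells in range)
def pvSet (m : List (List Int)) (i j : Nat) (v : Int) : List (List Int) :=
  m.set i ((m.getD i []).set j v)

def pow_matrix (m1 m2 : List (List Int)) : List (List Int) :=
  (List.range m1.length).foldl (fun temp i =>
    (List.range m1.length).foldl (fun temp j =>
      let s := (List.range m1.length).foldl (fun acc z => acc + pvGet m1 i z * pvGet m2 z j) 0
      pvSet temp i j s) temp) m2

def pow_in_n_matrix (matrixes : List (List Int)) : List (List Int) :=
  let k := matrixes.length
  let temp := (List.range k).foldl (fun t _ => pow_matrix t matrixes) matrixes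
  (List.range k).foldl (fun t i =>
    (List.range k).foldl (fun t j =>
      if pvGet t i j > 0 then pvSet t i j 1 else t) t) temp

-- ===== PORT B =====
-- _mul(k, a, b): k×k product as nested comprehensions (sum → foldl)
def pvMul (k : Nat) (a b : List (List Int)) : List (List Int) :=
  (List.range k).map (fun i => (List.range k).map (fun j =>
    (List.range k).foldl (fun acc z => acc + pvGet a i z * pvGet b z j) 0))

-- the while-loop of Source B: result * base^exp, binary exponentiation
def pvPowLoop (k : Nat) (result base : List (List Int)) (exp : Nat) : List (List Int) :=
  if exp = 0 then result
  else pvPowLoop k (if exp % 2 = 1 then pvMul k result base else result) (pvMul k base base) (exp / 2)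
termination_by exp
decreasing_by exact Nat.div_lt_self (Nat.pos_of_ne_zero (by omega)) (by omega)

def pow_in_n_matrix_alt (matrixes : List (List Int)) : List (List Int) :=
  let k := matrixes.length
  (pvPowLoop k matrixes matrixes k).map (fun row =>
    row.map (fun x => if x > 0 then 1 else x))

-- ===== PRECONDITION & SPEC =====
-- Pre_ excludes exactly the inputs where A raises IndexError: some row shorter
-- than the number of rows.
def Pre_pow_in_n_matrix (matrixes : List (List Int)) : Prop :=
  ∀ row ∈ matrixes, matrixes.length ≤ row.length

instance (matrixes : List (List Int)) : Decidable (Pre_pow_in_n_matrix matrixes) := by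
  unfold Pre_pow_in_n_matrix; infer_instance

def pvWitness_pow_in_n_matrix : List (List Int) := [[1, -2], [3, 0]]

-- On inputs where some row is longer than the number of rows k, A returns the
-- extra columns past the k×k block unchanged (an artefact of mutating a deep
-- copy of the input in place), while B returns the intended pure k×k
-- binarized power matrix.
def D_pow_in_n_matrix (matrixes : List (List Int)) : Prop :=
  ∃ row ∈ matrixes, matrixes.length < row.length

instance (matrixes : List (List Int)) : Decidable (D_pow_in_n_matrix matrixes) := by
  unfold D_pow_in_n_matrix; infer_instance

def Spec_pow_in_n_matrix (matrixes : List (List Int)) (out : List (List Int)) : Prop :=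
  ¬ D_pow_in_n_matrix matrixes → out = pow_in_n_matrix_alt matrixes
instance (matrixes : List (List Int)) (out : List (List Int)) : Decidable (Spec_pow_in_n_matrix matrixes out) := by unfold Spec_pow_in_n_matrix; infer_instance

def pvDiffWitness_pow_in_n_matrix : List (List Int) := [[1, 2, 3], [0, -1, 4]]
def pvDiffWitnessOut_pow_in_n_matrix : (List (List Int)) × (List (List Int)) :=
  ([[1, 1, 3], [0, -1, 4]], [[1, 1], [0, -1]])

-- ===== CLAIM (what is proved, stated in full; the proofs are below) =====
def Claim_unchanged_pow_in_n_matrix : Prop := ∀ (matrixes : List (List Int)), Dom_pow_in_n_matrix matrixes → Pre_pow_in_n_matrix matrixes → Spec_pow_in_n_matrix matrixes (pow_in_n_matrix matrixes)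
def Claim_changed_pow_in_n_matrix : Prop := Dom_pow_in_n_matrix (pvDiffWitness_pow_in_n_matrix) ∧ Pre_pow_in_n_matrix (pvDiffWitness_pow_in_n_matrix) ∧ D_pow_in_n_matrix (pvDiffWitness_pow_in_n_matrix) ∧ pow_in_n_matrix (pvDiffWitness_pow_in_n_matrix) = pvDiffWitnessOut_pow_in_n_matrix.1 ∧ pow_in_n_matrix_alt (pvDiffWitness_pow_in_n_matrix) = pvDiffWitnessOut_pow_in_n_matrix.2 ∧ pvDiffWitnessOut_pow_in_n_matrix.1 ≠ pvDiffWitnessOut_pow_in_n_matrix.2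
def Claim_exact_pow_in_n_matrix : Prop := ∀ (matrixes : List (List Int)), Dom_pow_in_n_matrix matrixes → Pre_pow_in_n_matrix matrixes → D_pow_in_n_matrix matrixes → pow_in_n_matrix matrixes ≠ pow_in_n_matrix_alt matrixes

-- ===== LEMMAS AND PROOFS =====

theorem foldl_add_int (l : List Nat) (f : Nat → Int) (c : Int) :
    l.foldl (fun a z => a + f z) c = c + (l.map f).sum := by
  induction l generalizing c with
  | nil => simp
  | cons x xs ih => simp [List.foldl_cons, ih, add_assoc]

theorem sum_range_fin (k : Nat) (f : Nat → Int) :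
    (List.range k).foldl (fun a z => a + f z) 0 = ∑ z : Fin k, f z.val := by
  rw [foldl_add_int, Fin.sum_univ_eq_sum_range, zero_add]
  exact Int.neg_inj.mp rfl

theorem getD_set (m : List (List Int)) (i : Nat) (r : List Int) (i' : Nat) :
    (m.set i r).getD i' [] = if i' = i ∧ i < m.length then r else m.getD i' [] := by
  simp [List.getD_eq_getElem?_getD, List.getElem?_set]
  split_ifs with h1 h2 h3 <;> simp_all

theorem pvSet_length (m : List (List Int)) (i j : Nat) (v : Int) :
    (pvSet m i j v).length = m.length := by simp [pvSet]

theorem pvSet_row_length (m : List (List Int)) (i j : Nat) (v : Int) (i' : Nat) :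
    ((pvSet m i j v).getD i' []).length = (m.getD i' []).length := by
  rw [pvSet, getD_set]; split_ifs with h
  · rw [h.1]; simp
  · rfl

theorem pvGet_pvSet_same (m : List (List Int)) (i j : Nat) (v : Int)
    (hi : i < m.length) (hj : j < (m.getD i []).length) :
    pvGet (pvSet m i j v) i j = v := by
  have hj' : j < m[i].length := by rwa [List.getD_eq_getElem m [] hi] at hj
  rw [pvGet, pvSet, getD_set]
  simp [hi, List.getD_eq_getElem?_getD, hj']

theorem pvGet_pvSet_ne (m : List (List Int)) (i j : Nat) (v : Int) (i' j' : Nat)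
    (h : i' ≠ i ∨ j' ≠ j) :
    pvGet (pvSet m i j v) i' j' = pvGet m i' j' := by
  rw [pvGet, pvSet, getD_set, pvGet]
  rcases h with h | h
  · simp [h]
  · split_ifs with h2
    · rw [h2.1]
      simp only [List.getD_eq_getElem?_getD, List.getElem?_set]
      rw [if_neg (Ne.symm h)]
    · rfl

theorem pvSet_self (m : List (List Int)) (i j : Nat)
    (hi : i < m.length) (hj : j < (m.getD i []).length) :
    pvSet m i j (pvGet m i j) = m := by
  have hj' : j < m[i].length := by rwa [List.getD_eq_getElem m [] hi] at hj
  rw [pvSet, pvGet, List.getD_eq_getElem m [] hi, List.getD_eq_getElem m[i] 0 hj',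
      List.set_getElem_self, List.set_getElem_self]

theorem rowFold_spec (u : Nat → Nat → Int → Int) (i : Nat) (t : List (List Int)) (n : Nat)
    (hi : i < t.length) (hn : n ≤ (t.getD i []).length) :
    ((List.range n).foldl (fun t j => pvSet t i j (u i j (pvGet t i j))) t).length = t.length ∧
    (∀ i', (((List.range n).foldl (fun t j => pvSet t i j (u i j (pvGet t i j))) t).getD i' []).length = (t.getD i' []).length) ∧
    (∀ i' j', pvGet ((List.range n).foldl (fun t j => pvSet t i j (u i j (pvGet t i j))) t) i' j'
      = if i' = i ∧ j' < n then u i j' (pvGet t i j') else pvGet t i' j') := by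
  induction n with
  | zero => simp
  | succ n ih =>
    obtain ⟨h1, h2, h3⟩ := ih (le_trans (Nat.le_succ n) hn)
    rw [List.range_succ, List.foldl_append, List.foldl_cons, List.foldl_nil]
    set r := (List.range n).foldl (fun t j => pvSet t i j (u i j (pvGet t i j))) t with hr
    have hget : pvGet r i n = pvGet t i n := by rw [h3]; simp
    refine ⟨by rw [pvSet_length, h1], fun i' => by rw [pvSet_row_length, h2], fun i' j' => ?_⟩
    by_cases hij : i' = i ∧ j' = n
    · rw [hij.1, hij.2, pvGet_pvSet_same _ _ _ _ (by omega) (by rw [h2]; omega), hget]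
      rw [if_pos ⟨rfl, by omega⟩]
    · rw [pvGet_pvSet_ne _ _ _ _ _ _ (by tauto), h3]
      split_ifs <;> first | rfl | omega

theorem cellFold_spec (u : Nat → Nat → Int → Int) (k : Nat) (t : List (List Int)) (n : Nat)
    (hlen : n ≤ t.length) (hrows : ∀ i' < n, k ≤ (t.getD i' []).length) :
    ((List.range n).foldl (fun t i => (List.range k).foldl (fun t j => pvSet t i j (u i j (pvGet t i j))) t) t).length = t.length ∧
    (∀ i', (((List.range n).foldl (fun t i => (List.range k).foldl (fun t j => pvSet t i j (u i j (pvGet t i j))) t) t).getD i' []).length = (t.getD i' []).length) ∧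
    (∀ i' j', pvGet ((List.range n).foldl (fun t i => (List.range k).foldl (fun t j => pvSet t i j (u i j (pvGet t i j))) t) t) i' j'
      = if i' < n ∧ j' < k then u i' j' (pvGet t i' j') else pvGet t i' j') := by
  induction n with
  | zero => simp
  | succ n ih =>
    obtain ⟨h1, h2, h3⟩ := ih (by omega) (fun i' h => hrows i' (by omega))
    rw [List.range_succ, List.foldl_append, List.foldl_cons, List.foldl_nil]
    set r := (List.range n).foldl (fun t i => (List.range k).foldl (fun t j => pvSet t i j (u i j (pvGet t i j))) t) t with hr
    obtain ⟨g1, g2, g3⟩ := rowFold_spec u n r k (by omega) (by rw [h2]; exact hrows n (by omega))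
    refine ⟨by rw [g1, h1], fun i' => by rw [g2, h2], fun i' j' => ?_⟩
    rw [g3]
    by_cases hii : i' = n
    · subst hii
      have hrow : ∀ j'', pvGet r i' j'' = pvGet t i' j'' := fun j'' => by
        rw [h3, if_neg (by omega)]
      by_cases hjk : j' < k
      · rw [if_pos ⟨rfl, hjk⟩, if_pos ⟨by omega, hjk⟩, hrow]
      · rw [if_neg (by tauto), if_neg (by tauto), hrow]
    · rw [if_neg (by tauto), h3]
      split_ifs <;> first | rfl | omega

-- the k×k integer matrix whose (i,j) entry is m[i][j]
def toMatK (k : Nat) (m : List (List Int)) : Matrix (Fin k) (Fin k) Int :=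
  Matrix.of fun i j => pvGet m i.val j.val

theorem getD_map_range {α : Type} (f : Nat → α) (k i : Nat) (d : α) (hi : i < k) :
    ((List.range k).map f).getD i d = f i := by
  simp [List.getD_eq_getElem?_getD, List.getElem?_range hi]

theorem pow_matrix_spec (t m : List (List Int)) (k : Nat) (hk : t.length = k)
    (hm : m.length = k) (hrows : ∀ i' < k, k ≤ (m.getD i' []).length) :
    (pow_matrix t m).length = k ∧
    (∀ i', ((pow_matrix t m).getD i' []).length = (m.getD i' []).length) ∧
    (∀ i' j', pvGet (pow_matrix t m) i' j' =
      if i' < k ∧ j' < k then (List.range k).foldl (fun acc z => acc + pvGet t i' z * pvGet m z j') 0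
      else pvGet m i' j') := by
  subst hk
  obtain ⟨h1, h2, h3⟩ := cellFold_spec
    (fun i j _ => (List.range t.length).foldl (fun acc z => acc + pvGet t i z * pvGet m z j) 0)
    t.length m t.length (by omega) (fun i' h => hrows i' h)
  exact ⟨hm ▸ h1, h2, h3⟩

theorem powA_inv (m : List (List Int)) (hpre : ∀ row ∈ m, m.length ≤ row.length) (n : Nat) :
    ((List.range n).foldl (fun t _ => pow_matrix t m) m).length = m.length ∧
    (∀ i', (((List.range n).foldl (fun t _ => pow_matrix t m) m).getD i' []).length = (m.getD i' []).length) ∧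
    (∀ i j (hi : i < m.length) (hj : j < m.length),
      pvGet ((List.range n).foldl (fun t _ => pow_matrix t m) m) i j
        = ((toMatK m.length m) ^ (n + 1)) ⟨i, hi⟩ ⟨j, hj⟩) ∧
    (∀ i j, ¬(i < m.length ∧ j < m.length) →
      pvGet ((List.range n).foldl (fun t _ => pow_matrix t m) m) i j = pvGet m i j) := by
  have hrows : ∀ i' < m.length, m.length ≤ (m.getD i' []).length := by
    intro i' h
    rw [List.getD_eq_getElem m [] h]
    exact hpre _ (List.getElem_mem h)
  induction n with
  | zero =>
    refine ⟨rfl, fun _ => rfl, fun i j hi hj => ?_, fun _ _ _ => rfl⟩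
    rw [pow_one]; rfl
  | succ n ih =>
    obtain ⟨h1, h2, h3, h4⟩ := ih
    rw [List.range_succ, List.foldl_append, List.foldl_cons, List.foldl_nil]
    set T := (List.range n).foldl (fun t _ => pow_matrix t m) m with hT
    obtain ⟨g1, g2, g3⟩ := pow_matrix_spec T m m.length h1 rfl hrows
    refine ⟨g1, fun i' => g2 i', fun i j hi hj => ?_, fun i j hij => ?_⟩
    · rw [g3, if_pos ⟨hi, hj⟩, sum_range_fin m.length (fun z => pvGet T i z * pvGet m z j)]
      have : ∀ z : Fin m.length, pvGet T i z.val * pvGet m z.val j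
          = ((toMatK m.length m) ^ (n + 1)) ⟨i, hi⟩ z * (toMatK m.length m) z ⟨j, hj⟩ := by
        intro z
        rw [h3 i z.val hi z.isLt]
        rfl
      rw [Finset.sum_congr rfl (fun z _ => this z), ← Matrix.mul_apply, ← pow_succ]
    · rw [g3, if_neg hij]

theorem pvMul_length (k : Nat) (a b : List (List Int)) : (pvMul k a b).length = k := by
  simp [pvMul]

theorem pvMul_row_length (k : Nat) (a b : List (List Int)) (i : Nat) (hi : i < k) :
    ((pvMul k a b).getD i []).length = k := by
  rw [pvMul, getD_map_range _ _ _ _ hi]; simp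

theorem pvMul_get (k : Nat) (a b : List (List Int)) (i j : Nat) (hi : i < k) (hj : j < k) :
    pvGet (pvMul k a b) i j = ∑ z : Fin k, pvGet a i z.val * pvGet b z.val j := by
  rw [pvMul, pvGet, getD_map_range _ _ _ _ hi, getD_map_range _ _ _ _ hj]
  exact sum_range_fin k _

theorem toMat_pvMul (k : Nat) (a b : List (List Int)) :
    toMatK k (pvMul k a b) = toMatK k a * toMatK k b := by
  ext i j
  rw [Matrix.mul_apply]
  exact pvMul_get k a b i.val j.val i.isLt j.isLt

theorem pvPowLoop_mat (k : Nat) (e : Nat) :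
    ∀ R B, toMatK k (pvPowLoop k R B e) = toMatK k R * (toMatK k B) ^ e := by
  induction e using Nat.strong_induction_on with
  | _ e ih =>
    intro R B
    rw [pvPowLoop]
    by_cases h0 : e = 0
    · simp [h0]
    · rw [if_neg h0, ih (e / 2) (Nat.div_lt_self (by omega) (by omega))]
      by_cases h1 : e % 2 = 1
      · rw [if_pos h1, toMat_pvMul, toMat_pvMul, mul_assoc]
        congr 1
        rw [← pow_two, ← pow_mul, ← pow_succ']
        congr 1
        omega
      · rw [if_neg h1, toMat_pvMul]
        congr 1
        rw [← pow_two, ← pow_mul]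
        congr 1
        omega

-- for exp ≥ 1 the loop's result is the output of some final multiplication,
-- hence a k×k list of lists
theorem pvPowLoop_isMul (k : Nat) (e : Nat) (he : 1 ≤ e) :
    ∀ R B, ∃ X Y, pvPowLoop k R B e = pvMul k X Y := by
  induction e using Nat.strong_induction_on with
  | _ e ih =>
    intro R B
    rw [pvPowLoop, if_neg (by omega)]
    by_cases h2 : e / 2 = 0
    · have h1 : e = 1 := by omega
      subst h1
      rw [pvPowLoop]
      exact ⟨R, B, by simp⟩
    · exact ih (e / 2) (Nat.div_lt_self (by omega) (by omega)) (by omega) _ _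

theorem pvPowLoop_shape (k : Nat) (m : List (List Int)) (hk : 1 ≤ k) :
    (pvPowLoop k m m k).length = k ∧
    (∀ i < k, ((pvPowLoop k m m k).getD i []).length = k) := by
  obtain ⟨X, Y, hXY⟩ := pvPowLoop_isMul k k hk m m
  rw [hXY]
  exact ⟨pvMul_length k X Y, fun i hi => pvMul_row_length k X Y i hi⟩

theorem pvSet_oob (m : List (List Int)) (i j : Nat) (v : Int)
    (h : ¬(i < m.length ∧ j < (m.getD i []).length)) : pvSet m i j v = m := by
  rw [pvSet]
  by_cases hi : i < m.length
  · have hj : (m.getD i []).length ≤ j := by omega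
    rw [List.set_eq_of_length_le hj, List.getD_eq_getElem m [] hi, List.set_getElem_self]
  · exact List.set_eq_of_length_le (by omega)

theorem binFold_eq (k : Nat) (t0 : List (List Int)) :
    (List.range k).foldl (fun t i => (List.range k).foldl
        (fun t j => if pvGet t i j > 0 then pvSet t i j 1 else t) t) t0
      = (List.range k).foldl (fun t i => (List.range k).foldl
        (fun t j => pvSet t i j ((fun _ _ v => if v > 0 then 1 else v) i j (pvGet t i j))) t) t0 := by
  have hstep : (fun (t : List (List Int)) (i : Nat) => (List.range k).foldl
        (fun t j => if pvGet t i j > 0 then pvSet t i j 1 else t) t)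
      = (fun t i => (List.range k).foldl
        (fun t j => pvSet t i j ((fun _ _ v => if v > 0 then 1 else v) i j (pvGet t i j))) t) := by
    funext t i
    have hin : (fun (t' : List (List Int)) (j : Nat) => if pvGet t' i j > 0 then pvSet t' i j 1 else t')
        = (fun t' j => pvSet t' i j ((fun _ _ v => if v > 0 then 1 else v) i j (pvGet t' i j))) := by
      funext t' j
      by_cases h : pvGet t' i j > 0
      · simp only [h, if_pos]
      · simp only [h, if_false]
        by_cases hr : i < t'.length ∧ j < (t'.getD i []).length
        · exact (pvSet_self t' i j hr.1 hr.2).symm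
        · exact (pvSet_oob t' i j _ hr).symm
    rw [hin]
  rw [hstep]

-- A's full result: length, row lengths, and in-block entries
theorem powA_full (m : List (List Int)) (hpre : ∀ row ∈ m, m.length ≤ row.length) :
    (pow_in_n_matrix m).length = m.length ∧
    (∀ i', ((pow_in_n_matrix m).getD i' []).length = (m.getD i' []).length) ∧
    (∀ i j (hi : i < m.length) (hj : j < m.length),
      pvGet (pow_in_n_matrix m) i j
        = (fun v : Int => if v > 0 then 1 else v)
            (((toMatK m.length m) ^ (m.length + 1)) ⟨i, hi⟩ ⟨j, hj⟩)) := by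
  obtain ⟨t1, t2, t3, t4⟩ := powA_inv m hpre m.length
  simp only [pow_in_n_matrix]
  rw [binFold_eq]
  set T := (List.range m.length).foldl (fun t _ => pow_matrix t m) m with hT
  obtain ⟨b1, b2, b3⟩ := cellFold_spec (fun _ _ v => if v > 0 then 1 else v) m.length T m.length
    (by omega) (fun i' h => by
      rw [t2 i', List.getD_eq_getElem m [] h]
      exact hpre _ (List.getElem_mem h))
  refine ⟨by rw [b1, t1], fun i' => by rw [b2, t2], fun i j hi hj => ?_⟩
  rw [b3, if_pos ⟨hi, hj⟩, t3 i j hi hj]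

-- ===== VERDICT (by name: the statements are the Claim_ definitions above) =====
theorem pow_in_n_matrix_spec : Claim_unchanged_pow_in_n_matrix := by
  unfold Claim_unchanged_pow_in_n_matrix
  intro m _hdom hpre hnd
  unfold Pre_pow_in_n_matrix at hpre
  unfold D_pow_in_n_matrix at hnd
  push Not at hnd
  have hsq : ∀ row ∈ m, row.length = m.length := fun row hr =>
    le_antisymm (hnd row hr) (hpre row hr)
  by_cases hk : m.length = 0
  · have hm : m = [] := List.length_eq_zero_iff.mp hk
    subst hm
    show pow_in_n_matrix [] = pow_in_n_matrix_alt []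
    simp [pow_in_n_matrix, pow_in_n_matrix_alt, pvPowLoop]
  · show pow_in_n_matrix m = pow_in_n_matrix_alt m
    obtain ⟨a1, a2, a3⟩ := powA_full m hpre
    obtain ⟨p1, p2⟩ := pvPowLoop_shape m.length m (by omega)
    set p := pvPowLoop m.length m m m.length with hp
    have hpget : ∀ i j (hi : i < m.length) (hj : j < m.length),
        pvGet p i j = ((toMatK m.length m) ^ (m.length + 1)) ⟨i, hi⟩ ⟨j, hj⟩ := by
      intro i j hi hj
      have hmat : toMatK m.length p = (toMatK m.length m) ^ (m.length + 1) := by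
        rw [hp, pvPowLoop_mat, ← pow_succ']
      show toMatK m.length p ⟨i, hi⟩ ⟨j, hj⟩ = _
      rw [hmat]
    simp only [pow_in_n_matrix_alt]
    apply List.ext_getElem
    · rw [a1, List.length_map, ← hp, p1]
    · intro i hiL hiR
      have hi : i < m.length := by rwa [a1] at hiL
      rw [List.getElem_map]
      have hrowA : (pow_in_n_matrix m)[i].length = m.length := by
        rw [← List.getD_eq_getElem _ [] hiL, a2, List.getD_eq_getElem m [] hi]
        exact hsq _ (List.getElem_mem hi)
      have hrowP : (p[i]'(by rw [p1]; exact hi)).length = m.length := by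
        rw [← List.getD_eq_getElem p [] (by rw [p1]; exact hi)]
        exact p2 i hi
      apply List.ext_getElem
      · rw [hrowA, List.length_map, hrowP]
      · intro j hjL hjR
        have hj : j < m.length := by rwa [hrowA] at hjL
        rw [List.getElem_map]
        have hA : (pow_in_n_matrix m)[i][j] = pvGet (pow_in_n_matrix m) i j := by
          rw [pvGet, List.getD_eq_getElem _ [] hiL, List.getD_eq_getElem _ 0 hjL]
        have hP : (p[i]'(by rw [p1]; exact hi))[j]'(by rw [hrowP]; exact hj)
            = pvGet p i j := by
          rw [pvGet, List.getD_eq_getElem p [] (by rw [p1]; exact hi),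
            List.getD_eq_getElem _ 0 (by rw [hrowP]; exact hj)]
        rw [hA, hP, a3 i j hi hj, hpget i j hi hj]

theorem pow_in_n_matrix_changed : Claim_changed_pow_in_n_matrix := by
  unfold Claim_changed_pow_in_n_matrix
  refine ⟨by decide, by decide, by decide, by decide, ?_, by decide⟩
  have e0 : ∀ R B : List (List Int), pvPowLoop 2 R B 0 = R := by
    intro R B; rw [pvPowLoop]; norm_num
  have e1 : ∀ R B : List (List Int), pvPowLoop 2 R B 1 = pvMul 2 R B := by
    intro R B; rw [pvPowLoop]; norm_num [e0]
  have e2 : ∀ R B : List (List Int), pvPowLoop 2 R B 2 = pvMul 2 R (pvMul 2 B B) := by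
    intro R B; rw [pvPowLoop]; norm_num [e1]
  show (pvPowLoop 2 [[1, 2, 3], [0, -1, 4]] [[1, 2, 3], [0, -1, 4]] 2).map
      (fun row => row.map (fun x => if x > 0 then 1 else x)) = [[1, 1], [0, -1]]
  rw [e2]
  decide

theorem pow_in_n_matrix_tight : Claim_exact_pow_in_n_matrix := by
  unfold Claim_exact_pow_in_n_matrix
  intro m _hdom hpre hd heq
  unfold Pre_pow_in_n_matrix at hpre
  obtain ⟨row, hmem, hlen⟩ := hd
  obtain ⟨i, hi, hrow⟩ := List.getElem_of_mem hmem
  have hk : 1 ≤ m.length := by omega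
  obtain ⟨a1, a2, _⟩ := powA_full m hpre
  obtain ⟨p1, p2⟩ := pvPowLoop_shape m.length m hk
  have hA : ((pow_in_n_matrix m).getD i []).length = row.length := by
    rw [a2, List.getD_eq_getElem m [] hi, hrow]
  have hB : ((pow_in_n_matrix_alt m).getD i []).length = m.length := by
    simp only [pow_in_n_matrix_alt]
    have hip : i < (pvPowLoop m.length m m m.length).length := by rw [p1]; exact hi
    rw [List.getD_eq_getElem _ [] (by simpa using hip), List.getElem_map, List.length_map,
      ← List.getD_eq_getElem _ [] hip]
    exact p2 i hi
  rw [heq, hB] at hA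
  omega
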